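-- pv_equiv track=rewrite | github.com/JacobLoe/optical_flow | optical_flow.py | group_angles_and_magnitudes
-- ===== SOURCE A (Python) =====
-- def group_angles_and_magnitudes(summed_mags, angles_histogram_list, timestamps):
--
--     grouped_mags = [summed_mags[0]]  # start the grouped mag list
--     grouped_angles = [angles_histogram_list[0]]  # save the first the first histogram
--     segment_timestamps = []
--     prev_mag = summed_mags[0]  # save the first magnitude for later comparison as previous magnitude
--     start_ms = timestamps[0][0]
--     end_ms = timestamps[0][1]  # set the end timestamp
--     j = 0
--     # iterate through the magnitudes, timestamps and angles starting from the second element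
--     for curr_mag, curr_ts, curr_angles_histogram in zip(summed_mags[1:], timestamps[1:], angles_histogram_list[1:]):
--         if prev_mag == curr_mag:  # as long as the previous and current magnitude are the same
--             end_ms = curr_ts[1]     # set the end of the "current" segment to the timestamp of the current magnitude
--
--             # sum up all the histograms (of the angles) and the magnitudes for each angle
--             for key in grouped_angles[j]:
--                 grouped_angles[j][key][0] += curr_angles_histogram[key][0]
--                 grouped_angles[j][key][1] += curr_angles_histogram[key][1]
--
--         else:   # if the magnitudes deviate add a new entry
--             segment_timestamps.append((start_ms, end_ms))  # set the segment boundaries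
--             start_ms = end_ms   # set the start timestamp of the next segment as the end of the current segment
--             end_ms = curr_ts[1]  # set the end of the "current" segment to the timestamp of the current magnitude
--
--             grouped_mags.append(curr_mag)  # add the next value to the grouped mag list
--             prev_mag = curr_mag  # save the first magnitude for later comparison as previous mag
--
--             grouped_angles.append(curr_angles_histogram)
--             j += 1
--
--     segment_timestamps.append((start_ms, end_ms))  # set the segment boundaries for the last segment
--
--     assert len(grouped_mags) == len(grouped_angles)
--     assert len(grouped_mags) == len(segment_timestamps)
--
--     return grouped_mags, grouped_angles, segment_timestamps
-- ===== SOURCE B (Python) =====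
-- def group_angles_and_magnitudes(summed_mags, angles_histogram_list, timestamps):
--     # Run-at-a-time decomposition: zip once, then consume one maximal run of equal
--     # magnitudes per outer step (mutates the first histogram of each run in place, like A).
--     triples = list(zip(summed_mags, angles_histogram_list, timestamps))
--     grouped_mags, grouped_angles, segment_timestamps = [], [], []
--     start_ms = timestamps[0][0]
--     i, n = 0, len(triples)
--     while i < n:
--         mag, acc, _ = triples[i]
--         j = i + 1
--         while j < n and triples[j][0] == mag:
--             h = triples[j][1]
--             for key in acc:
--                 acc[key][0] += h[key][0]
--                 acc[key][1] += h[key][1]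
--             j += 1
--         end_ms = triples[j - 1][2][1]
--         grouped_mags.append(mag)
--         grouped_angles.append(acc)
--         segment_timestamps.append((start_ms, end_ms))
--         start_ms = end_ms
--         i = j
--     return grouped_mags, grouped_angles, segment_timestamps
-- ===== Notes on version B (the rewrite author's own statement) =====
-- stated objective: alternative
-- what changed: A's single streaming pass with prev_mag/j/end_ms bookkeeping is replaced by zipping the three lists once and consuming one maximal run of equal magnitudes per outer-loop step (inner scan finds the run end; segment end taken from the run's last triple), with no prev_mag, no histogram index j and no threaded end_ms.
import Mathlib
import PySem

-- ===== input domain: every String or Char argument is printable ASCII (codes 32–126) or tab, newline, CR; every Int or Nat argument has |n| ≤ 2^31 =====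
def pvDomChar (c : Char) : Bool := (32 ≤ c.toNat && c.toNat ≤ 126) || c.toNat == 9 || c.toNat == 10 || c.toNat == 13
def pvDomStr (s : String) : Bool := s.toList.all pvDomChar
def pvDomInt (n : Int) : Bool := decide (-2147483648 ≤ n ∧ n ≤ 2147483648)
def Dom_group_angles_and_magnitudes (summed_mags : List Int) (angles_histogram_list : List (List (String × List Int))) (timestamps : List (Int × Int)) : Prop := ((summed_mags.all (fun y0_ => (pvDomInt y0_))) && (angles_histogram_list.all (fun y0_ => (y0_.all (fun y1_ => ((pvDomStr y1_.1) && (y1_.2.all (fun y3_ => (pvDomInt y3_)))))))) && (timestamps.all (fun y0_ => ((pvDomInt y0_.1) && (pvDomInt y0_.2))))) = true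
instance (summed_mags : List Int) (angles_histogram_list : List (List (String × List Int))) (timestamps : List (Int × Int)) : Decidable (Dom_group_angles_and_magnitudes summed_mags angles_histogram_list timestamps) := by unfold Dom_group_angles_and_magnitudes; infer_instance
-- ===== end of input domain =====

-- B replaces A's streaming pass (prev_mag / j / end_ms bookkeeping) by a run-at-a-time loop over
-- the zipped triples (objective: alternative decomposition, same cost). Both Pythons mutate the
-- first histogram dict of each run in place; the equivalence proved here is about the RETURN value.

-- ===== PORT A =====
-- 'a[key][0] += c[key][0]; a[key][1] += c[key][1]' on one value list; exact on Pre_ (lists of length ≥ 2)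
def pvAddHist (v c : List Int) : List Int :=
  let v1 := v.set 0 (v.getD 0 0 + c.getD 0 0)
  v1.set 1 (v1.getD 1 0 + c.getD 1 0)

-- the inner 'for key in <run-start histogram>' merge loop (textually identical in A and in B's Source B);
-- dict lookups via PySem.Dict; exact on Pre_ (every key of acc present in curr)
def pvMergeHist (acc curr : List (String × List Int)) : List (String × List Int) :=
  (acc.foldl (fun d kv => d.modify kv.1 [] (fun v => pvAddHist v ((PySem.Dict.mk curr).getD kv.1 [])))
    (PySem.Dict.mk acc)).items

-- A's for-loop over zip(summed_mags[1:], timestamps[1:], angles_histogram_list[1:]) with state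
-- (grouped_mags, grouped_angles, segment_timestamps, prev_mag, start_ms, end_ms, j)
def pvALoop (mags : List Int) (ts : List (Int × Int)) (hs : List (List (String × List Int)))
    (gm : List Int) (ga : List (List (String × List Int))) (st : List (Int × Int))
    (prev sms ems : Int) (j : Nat) :
    List Int × (List (List (String × List Int))) × (List (Int × Int)) :=
  match mags, ts, hs with
  | m :: mags', t :: ts', h :: hs' =>
    if prev = m then
      pvALoop mags' ts' hs' gm (ga.modify j (fun acc => pvMergeHist acc h)) st prev sms t.2 j
    else
      pvALoop mags' ts' hs' (gm ++ [m]) (ga ++ [h]) (st ++ [(sms, ems)]) m ems t.2 (j + 1)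
  | _, _, _ => (gm, ga, st ++ [(sms, ems)])

def group_angles_and_magnitudes (summed_mags : List Int) (angles_histogram_list : List (List (String × List Int))) (timestamps : List (Int × Int)) : List Int × (List (List (String × List Int))) × (List (Int × Int)) :=
  match summed_mags, angles_histogram_list, timestamps with
  | m0 :: mags', h0 :: hs', t0 :: ts' =>
      pvALoop mags' ts' hs' [m0] [h0] [] m0 t0.1 t0.2 0
  | _, _, _ => ([], [], [])   -- Python A raises IndexError on an empty input; excluded by Pre_

-- ===== PORT B =====
-- B's outer while-loop: one iteration per maximal run of equal magnitudes in the zipped triples;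
-- the inner 'while j < n and triples[j][0] == mag' scan is the takeWhile/dropWhile split
def pvBLoop (l : List (Int × (List (String × List Int)) × (Int × Int)))
    (gm : List Int) (ga : List (List (String × List Int))) (st : List (Int × Int))
    (sms : Int) : List Int × (List (List (String × List Int))) × (List (Int × Int)) :=
  match l with
  | [] => (gm, ga, st)
  | x :: xs =>
    let run := xs.takeWhile (fun y => y.1 == x.1)
    let rest := xs.dropWhile (fun y => y.1 == x.1)
    let acc := run.foldl (fun a y => pvMergeHist a y.2.1) x.2.1
    let ems := ((x :: run).getLastD x).2.2.2          -- triples[j-1][2][1]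
    pvBLoop rest (gm ++ [x.1]) (ga ++ [acc]) (st ++ [(sms, ems)]) ems
termination_by l.length
decreasing_by simp only [List.length_cons]; exact Nat.lt_succ_of_le (List.length_dropWhile_le _ _)

def group_angles_and_magnitudes_alt (summed_mags : List Int) (angles_histogram_list : List (List (String × List Int))) (timestamps : List (Int × Int)) : List Int × (List (List (String × List Int))) × (List (Int × Int)) :=
  match timestamps with
  | [] => ([], [], [])   -- Python B raises IndexError reading timestamps[0][0]; excluded by Pre_
  | t0 :: _ => pvBLoop (summed_mags.zip (angles_histogram_list.zip timestamps)) [] [] [] t0.1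

-- ===== PRECONDITION & SPEC =====
-- Pre_ = exactly the inputs where Python A returns: all three lists nonempty, and inside the zipped
-- prefix, for every run start s and every later index i of the same run, every key of histogram s
-- maps (in histograms s and i) to a list of length ≥ 2 and is present in histogram i
-- (otherwise A's merge loop raises KeyError/IndexError).
def Pre_group_angles_and_magnitudes (summed_mags : List Int) (angles_histogram_list : List (List (String × List Int))) (timestamps : List (Int × Int)) : Prop :=
  summed_mags ≠ [] ∧ angles_histogram_list ≠ [] ∧ timestamps ≠ [] ∧
  (∀ i ∈ List.range (min summed_mags.length (min angles_histogram_list.length timestamps.length)),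
   ∀ s ∈ List.range i,
    (s = 0 ∨ summed_mags.getD (s-1) 0 ≠ summed_mags.getD s 0) →
    (∀ k ∈ List.range (i+1), s ≤ k → summed_mags.getD k 0 = summed_mags.getD s 0) →
    ∀ p ∈ angles_histogram_list.getD s [], 2 ≤ p.2.length ∧
      ((PySem.Dict.mk (angles_histogram_list.getD i [])).get? p.1).any (fun v => decide (2 ≤ v.length)) = true)
instance (summed_mags : List Int) (angles_histogram_list : List (List (String × List Int))) (timestamps : List (Int × Int)) : Decidable (Pre_group_angles_and_magnitudes summed_mags angles_histogram_list timestamps) := by unfold Pre_group_angles_and_magnitudes; infer_instance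

def pvWitness_group_angles_and_magnitudes : List Int × (List (List (String × List Int))) × (List (Int × Int)) :=
  ([1, 1], [[("a", [2, 3])], [("a", [4, 5])]], [(0, 5), (5, 9)])

def Spec_group_angles_and_magnitudes (summed_mags : List Int) (angles_histogram_list : List (List (String × List Int))) (timestamps : List (Int × Int)) (out : List Int × (List (List (String × List Int))) × (List (Int × Int))) : Prop := out = group_angles_and_magnitudes_alt summed_mags angles_histogram_list timestamps
instance (summed_mags : List Int) (angles_histogram_list : List (List (String × List Int))) (timestamps : List (Int × Int)) (out : List Int × (List (List (String × List Int))) × (List (Int × Int))) : Decidable (Spec_group_angles_and_magnitudes summed_mags angles_histogram_list timestamps out) := by unfold Spec_group_angles_and_magnitudes; infer_instance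

-- ===== CLAIM (what is proved, stated in full; the proofs are below) =====
def Claim_equal_group_angles_and_magnitudes : Prop := ∀ (summed_mags : List Int) (angles_histogram_list : List (List (String × List Int))) (timestamps : List (Int × Int)), Dom_group_angles_and_magnitudes summed_mags angles_histogram_list timestamps → Pre_group_angles_and_magnitudes summed_mags angles_histogram_list timestamps → Spec_group_angles_and_magnitudes summed_mags angles_histogram_list timestamps (group_angles_and_magnitudes summed_mags angles_histogram_list timestamps)
-- ===== LEMMAS AND PROOFS =====

-- B's loop mid-run: the still-unconsumed part of the current run (key m, accumulator acc0,
-- pending segment start sms, end-so-far ems), followed by pvBLoop on the rest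
def pvRunCont (m : Int) (acc0 : List (String × List Int)) (sms ems : Int)
    (l : List (Int × (List (String × List Int)) × (Int × Int)))
    (gm : List Int) (ga : List (List (String × List Int))) (st : List (Int × Int)) :
    List Int × (List (List (String × List Int))) × (List (Int × Int)) :=
  let run := l.takeWhile (fun y => y.1 == m)
  let rest := l.dropWhile (fun y => y.1 == m)
  let acc := run.foldl (fun a y => pvMergeHist a y.2.1) acc0
  let ems' := (run.map (fun y => y.2.2.2)).getLastD ems
  pvBLoop rest (gm ++ [m]) (ga ++ [acc]) (st ++ [(sms, ems')]) ems'

theorem pvModify_append_last {α : Type} (l : List α) (a : α) (f : α → α) :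
    (l ++ [a]).modify l.length f = l ++ [f a] := by
  induction l with
  | nil => rfl
  | cons x xs ih => simpa [List.modify] using ih

theorem pvBLoop_cons (x : Int × (List (String × List Int)) × (Int × Int))
    (xs : List (Int × (List (String × List Int)) × (Int × Int)))
    (gm : List Int) (ga : List (List (String × List Int))) (st : List (Int × Int)) (sms : Int) :
    pvBLoop (x :: xs) gm ga st sms = pvRunCont x.1 x.2.1 sms x.2.2.2 xs gm ga st := by
  simp only [pvBLoop, pvRunCont, List.getLastD_cons, List.getLastD_map]

theorem pvALoop_eq_runCont (mags : List Int) : ∀ (ts : List (Int × Int))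
    (hs : List (List (String × List Int))) (gm : List Int)
    (ga : List (List (String × List Int))) (st : List (Int × Int))
    (m : Int) (acc : List (String × List Int)) (sms ems : Int),
    pvALoop mags ts hs (gm ++ [m]) (ga ++ [acc]) st m sms ems ga.length
      = pvRunCont m acc sms ems (mags.zip (hs.zip ts)) gm ga st := by
  induction mags with
  | nil =>
    intro ts hs gm ga st m acc sms ems
    simp [pvALoop, pvRunCont, pvBLoop]
  | cons m' mags' ih =>
    intro ts hs gm ga st m acc sms ems
    cases ts with
    | nil => cases hs <;> simp [pvALoop, pvRunCont, pvBLoop]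
    | cons t ts' =>
      cases hs with
      | nil => simp [pvALoop, pvRunCont, pvBLoop]
      | cons h hs' =>
        rw [pvALoop]
        by_cases hm : m = m'
        · subst hm
          rw [if_pos rfl, pvModify_append_last,
            ih ts' hs' gm ga st m (pvMergeHist acc h) sms t.2]
          simp only [pvRunCont, List.zip_cons_cons, List.takeWhile_cons, List.dropWhile_cons,
            beq_self_eq_true, if_true, List.foldl_cons, List.map_cons, List.getLastD_cons]
        · rw [if_neg hm, show ga.length + 1 = (ga ++ [acc]).length by simp,
            ih ts' hs' (gm ++ [m]) (ga ++ [acc]) (st ++ [(sms, ems)]) m' h ems t.2]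
          have hne : ((m' : Int) == m) = false := by
            simp only [beq_eq_false_iff_ne, ne_eq]; exact fun e => hm e.symm
          conv_rhs => rw [pvRunCont]
          simp only [List.zip_cons_cons, List.takeWhile_cons, List.dropWhile_cons, hne,
            Bool.false_eq_true, if_false, List.foldl_nil, List.map_nil, List.getLastD_nil]
          rw [pvBLoop_cons]

-- ===== VERDICT (by name: the statement is the Claim_ definition above) =====
theorem group_angles_and_magnitudes_spec : Claim_equal_group_angles_and_magnitudes := by
  intro sm ahl ts _ hpre
  obtain ⟨hsm, hahl, hts, -⟩ := hpre
  unfold Spec_group_angles_and_magnitudes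
  obtain ⟨m0, mags', rfl⟩ := List.exists_cons_of_ne_nil hsm
  obtain ⟨h0, hs', rfl⟩ := List.exists_cons_of_ne_nil hahl
  obtain ⟨t0, ts', rfl⟩ := List.exists_cons_of_ne_nil hts
  rw [group_angles_and_magnitudes, group_angles_and_magnitudes_alt]
  have hA := pvALoop_eq_runCont mags' ts' hs' [] [] [] m0 h0 t0.1 t0.2
  simp only [List.nil_append, List.length_nil] at hA
  rw [hA, List.zip_cons_cons, List.zip_cons_cons, pvBLoop_cons]
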